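-- pv_equiv track=rewrite | github.com/griffithlab/pVACtools | pvactools/tools/pvaccompare/run_utils.py | merge_hla_field
-- ===== SOURCE A (Python) =====
-- def merge_hla_field(split_id_parts):
--     """
--     Purpose: Combines 'HLA' and the following part into a single element if found
--     Modifies: Nothing
--     Returns: List of properly split ID parts
--     """
--     new_parts = []
--     skip = False
--     for i, part in enumerate(split_id_parts):
--         if skip:
--             skip = False
--             continue
--         if part == "HLA" and i + 1 < len(split_id_parts):
--             new_parts.append(f"HLA-{split_id_parts[i+1]}")
--             skip = True
--         else:
--             new_parts.append(part)
--     return new_parts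
-- ===== SOURCE B (Python) =====
-- def merge_hla_field(split_id_parts):
--     """
--     Run-length grouping: each maximal run of k consecutive "HLA" tokens yields
--     k//2 "HLA-HLA" pairs at once; an odd run merges with the element after the
--     run (or leaves a bare "HLA" at the end of the list).
--     """
--     n = len(split_id_parts)
--     out = []
--     i = 0
--     while i < n:
--         if split_id_parts[i] != "HLA":
--             out.append(split_id_parts[i])
--             i += 1
--             continue
--         j = i
--         while j < n and split_id_parts[j] == "HLA":
--             j += 1
--         k = j - i
--         out.extend(["HLA-HLA"] * (k // 2))
--         if k % 2:
--             if j < n: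
--                 out.append("HLA-" + split_id_parts[j])
--                 j += 1
--             else:
--                 out.append("HLA")
--         i = j
--     return out
-- ===== Notes on version B (the rewrite author's own statement) =====
-- stated objective: alternative
-- what changed: Replaces A's element-wise lookahead-and-skip scan by run-length grouping: B finds each maximal run of k consecutive 'HLA' tokens, emits k//2 'HLA-HLA' pairs in bulk, and the run's parity decides whether the element after the run is merged or a bare trailing 'HLA' remains.
import Mathlib
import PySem

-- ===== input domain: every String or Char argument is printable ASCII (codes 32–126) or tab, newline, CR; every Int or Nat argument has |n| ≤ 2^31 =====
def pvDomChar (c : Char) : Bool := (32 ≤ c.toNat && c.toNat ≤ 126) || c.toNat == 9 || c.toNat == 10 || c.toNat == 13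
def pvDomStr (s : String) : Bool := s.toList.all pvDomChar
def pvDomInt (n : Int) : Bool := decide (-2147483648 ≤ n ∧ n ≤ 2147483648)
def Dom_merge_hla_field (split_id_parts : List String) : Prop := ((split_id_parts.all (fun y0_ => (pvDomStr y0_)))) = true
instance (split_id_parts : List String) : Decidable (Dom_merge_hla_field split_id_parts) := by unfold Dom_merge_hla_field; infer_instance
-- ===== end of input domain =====

-- B replaces A's element-wise lookahead-and-skip scan by run-length grouping: it counts each maximal run of k consecutive "HLA" tokens and emits k/2 merged pairs in bulk, parity deciding the leftover (alternative algorithm, same cost).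

-- ===== PORT A =====
-- the 'for i, part in enumerate(...)' loop, carrying the full list for the split_id_parts[i+1] lookup
def mergeHlaLoopA (full : List String) : Nat → List String → Bool → List String → List String
  | _, [], _, acc => acc
  | i, part :: rest, skip, acc =>
    if skip then mergeHlaLoopA full (i + 1) rest false acc
    else if part == "HLA" && decide (i + 1 < full.length) then
      mergeHlaLoopA full (i + 1) rest true
        (acc ++ ["HLA-" ++ ((PySem.List.pyGet? full ((i : Int) + 1)).getD "")])
    else mergeHlaLoopA full (i + 1) rest skip (acc ++ [part])

def merge_hla_field (split_id_parts : List String) : List String :=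
  mergeHlaLoopA split_id_parts 0 split_id_parts false []

-- ===== PORT B =====
-- Source B's inner "while j < n and split_id_parts[j] == 'HLA'" run counter, on the current suffix
-- and Source B's outer while loop: the remaining suffix split_id_parts[i:] is the recursion argument
def hlaRun : List String → Nat
  | [] => 0
  | p :: rest => if p == "HLA" then 1 + hlaRun rest else 0

def mergeHlaRuns (l : List String) : List String :=
  match l with
  | [] => []
  | p :: rest =>
    if p == "HLA" then
      let k := 1 + hlaRun rest
      let tail := rest.drop (k - 1)
      List.replicate (k / 2) "HLA-HLA" ++
        (if k % 2 = 1 then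
          if tail.isEmpty then ["HLA"]
          else ("HLA-" ++ tail.headD "") :: mergeHlaRuns tail.tail
        else mergeHlaRuns tail)
    else p :: mergeHlaRuns rest
termination_by l.length
decreasing_by all_goals (simp; try omega)


def merge_hla_field_alt (split_id_parts : List String) : List String :=
  mergeHlaRuns split_id_parts

-- ===== PRECONDITION & SPEC =====
def Spec_merge_hla_field (split_id_parts : List String) (out : List String) : Prop := out = merge_hla_field_alt split_id_parts
instance (split_id_parts : List String) (out : List String) : Decidable (Spec_merge_hla_field split_id_parts out) := by unfold Spec_merge_hla_field; infer_instance

-- ===== CLAIM (what is proved, stated in full; the proofs are below) =====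
def Claim_equal_merge_hla_field : Prop := ∀ (split_id_parts : List String), Dom_merge_hla_field split_id_parts → Spec_merge_hla_field split_id_parts (merge_hla_field split_id_parts)

-- ===== LEMMAS AND PROOFS =====
-- proof-only middle form: the simple pairwise recursion; A's loop and B's run grouping both equal it
theorem hlaRun_pos (xs : List String) (h : 1 ≤ hlaRun xs) :
    xs = "HLA" :: xs.tail ∧ hlaRun xs = 1 + hlaRun xs.tail := by
  cases xs with
  | nil => simp [hlaRun] at h
  | cons p r =>
    by_cases hp : p = "HLA"
    · subst hp; simp [hlaRun]
    · simp [hlaRun, hp] at h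

theorem mergeHlaRuns_two_hla (xs : List String) :
    mergeHlaRuns ("HLA" :: "HLA" :: xs) = "HLA-HLA" :: mergeHlaRuns xs := by
  rcases Nat.eq_zero_or_pos (hlaRun xs) with hm | hm
  · rw [mergeHlaRuns]
    rw [if_pos (by simp)]
    simp only [hlaRun, if_pos (by simp : (("HLA" : String) == "HLA") = true), hm]
    norm_num
  · obtain ⟨hx, hrun⟩ := hlaRun_pos xs hm
    set m := hlaRun xs with hmdef
    rw [mergeHlaRuns]
    rw [if_pos (by simp)]
    conv_rhs => rw [hx, mergeHlaRuns]
    rw [if_pos (by simp)]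
    have h1 : hlaRun ("HLA" :: xs) = 1 + m := by simp [hlaRun]; exact hmdef.symm
    simp only [h1]
    have hk1 : 1 + (1 + m) - 1 = m + 1 := by omega
    have hk2 : 1 + hlaRun xs.tail - 1 = hlaRun xs.tail := by omega
    rw [hk1, hk2]
    have hdropL : ("HLA" :: xs).drop (m + 1) = xs.drop m := by simp
    have hdropR : xs.tail.drop (hlaRun xs.tail) = xs.drop m := by
      conv_rhs => rw [hx]
      rw [hrun, Nat.add_comm]
      simp
    rw [hdropL, hdropR]
    have hdiv : (1 + (1 + m)) / 2 = (1 + hlaRun xs.tail) / 2 + 1 := by omega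
    have hmod : (1 + (1 + m)) % 2 = (1 + hlaRun xs.tail) % 2 := by omega
    rw [hdiv, hmod, List.replicate_succ]
    simp

def mergeRec : List String → List String
  | [] => []
  | part :: rest =>
    if part == "HLA" then
      match rest with
      | [] => [part]
      | nxt :: rest' => ("HLA-" ++ nxt) :: mergeRec rest'
    else part :: mergeRec rest

theorem mergeRec_eq_runs : ∀ (l : List String), mergeRec l = mergeHlaRuns l := by
  intro l
  induction hn : l.length using Nat.strong_induction_on generalizing l with
  | _ n ih =>
    match l with
    | [] => simp [mergeRec, mergeHlaRuns]
    | p :: rest =>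
      by_cases hp : p = "HLA"
      · subst hp
        match rest with
        | [] => simp [mergeRec, mergeHlaRuns, hlaRun]
        | nxt :: rest2 =>
          by_cases hnxt : nxt = "HLA"
          · subst hnxt
            rw [mergeHlaRuns_two_hla]
            rw [mergeRec.eq_def]
            simp only [if_pos (by simp : (("HLA" : String) == "HLA") = true)]
            rw [ih rest2.length (by simp [← hn]) rest2 rfl]
            rfl
          · have h0 : hlaRun (nxt :: rest2) = 0 := by simp [hlaRun, hnxt]
            rw [mergeRec.eq_def]
            simp only [if_pos (by simp : (("HLA" : String) == "HLA") = true)]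
            rw [mergeHlaRuns]
            rw [if_pos (by simp)]
            simp only [h0]
            simp [List.headD]
            rw [ih rest2.length (by simp [← hn]) rest2 rfl]
      · have hrec : mergeRec (p :: rest) = p :: mergeRec rest := by
          rw [mergeRec.eq_def]; simp [hp]
        rw [hrec, mergeHlaRuns]
        rw [if_neg (by simp [hp])]
        rw [ih rest.length (by simp [← hn]) rest rfl]

theorem mergeHlaLoopA_eq_rec (full : List String) :
    ∀ (rest : List String) (i : Nat) (acc : List String),
      full.drop i = rest →
      mergeHlaLoopA full i rest false acc = acc ++ mergeRec rest := by
  intro rest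
  induction hn : rest.length using Nat.strong_induction_on generalizing rest with
  | _ n ih =>
    intro i acc hdrop
    match rest with
    | [] => simp [mergeHlaLoopA, mergeRec]
    | part :: rest2 =>
      have hlen : rest2.length = full.length - (i + 1) := by
        have : full.drop (i + 1) = rest2 := by
          rw [← List.drop_drop]
          simp [hdrop]
        rw [← this, List.length_drop]
      have hi : i < full.length := by
        have := congrArg List.length hdrop
        simp at this; omega
      by_cases hhla : part = "HLA"
      · by_cases hb : i + 1 < full.length
        · match rest2 with
          | [] => simp at hlen; omega
          | nxt :: rest3 =>
            have hget : PySem.List.pyGet? full ((i : Int) + 1) = some nxt := by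
              have h1 : full.drop (i + 1) = nxt :: rest3 := by
                rw [← List.drop_drop]; simp [hdrop]
              have : ((i : Int) + 1) = ((i + 1 : Nat) : Int) := by push_cast; ring
              rw [this, PySem.List.pyGet?_natCast]
              rw [List.getElem?_eq_getElem (by omega)]
              have := List.getElem_drop (xs := full) (i := i + 1) (j := 0) (h := by rw [h1]; simp)
              simp [h1] at this
              simp [this]
            have h3 : full.drop (i + 2) = rest3 := by
              have h1 : full.drop (i + 1) = nxt :: rest3 := by
                rw [← List.drop_drop]; simp [hdrop]
              rw [show i + 2 = (i+1) + 1 by ring, ← List.drop_drop]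
              simp [h1]
            rw [mergeHlaLoopA]
            simp only [hhla, hb, hget]
            rw [if_neg (by simp), if_pos (by simp)]
            rw [mergeHlaLoopA]
            rw [if_pos rfl]
            rw [ih rest3.length (by simp [← hn]) rest3 rfl (i + 2) _ h3]
            simp [mergeRec]
        · have : rest2 = [] := by
            have := hlen; cases rest2 with
            | nil => rfl
            | cons a b => simp at this; omega
          subst this
          rw [mergeHlaLoopA]
          simp only [hhla, hb]
          rw [if_neg (by simp), if_neg (by simp)]
          simp [mergeHlaLoopA, mergeRec]
      · rw [mergeHlaLoopA]
        rw [if_neg (by simp), if_neg (by simp [hhla])]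
        rw [ih rest2.length (by simp [← hn]) rest2 rfl (i + 1) _ (by rw [← List.drop_drop]; simp [hdrop])]
        conv_rhs => rw [mergeRec.eq_def]
        simp [hhla]

-- ===== VERDICT (by name: the statement is the Claim_ definition above) =====
theorem merge_hla_field_spec : Claim_equal_merge_hla_field := by
  intro xs _
  unfold Spec_merge_hla_field merge_hla_field merge_hla_field_alt
  rw [mergeHlaLoopA_eq_rec xs xs 0 [] (by simp)]
  simp [mergeRec_eq_runs]
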